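-- pv_equiv track=rewrite | github.com/acviana/advent-of-code-2020 | advent_of_code_2020/day_11.py | get_line_of_sight
-- ===== SOURCE A (Python) =====
-- from typing import List
--
-- def get_line_of_sight(
--     row_start_position: int,
--     column_start_position: int,
--     delta_row: int,
--     delta_column: int,
--     data: List[str],
-- ) -> str:
--     step = 1
--     next_position = ""
--     # Forgive me, it's late.
--     while 1 == 1:
--         row_position = row_start_position + (step * delta_row)
--         if row_position > len(data) - 1 or row_position < 0:
--             return next_position
--         column_position = column_start_position + (step * delta_column)
--         if column_position > len(data[0]) - 1 or column_position < 0: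
--             return next_position
--         next_position = data[row_position][column_position]
--         if next_position in ["#", "L"]:
--             return next_position
--         else:
--             step += 1
--     assert False
-- ===== SOURCE B (Python) =====
-- from typing import List
--
--
-- def get_line_of_sight(
--     row_start_position: int,
--     column_start_position: int,
--     delta_row: int,
--     delta_column: int,
--     data: List[str],
-- ) -> str:
--     n = len(data)
--     m = len(data[0]) if data else 0
--
--     def axis_steps(start, delta, size):
--         # consecutive steps k = 1, 2, ... with 0 <= start + k*delta < size
--         # (None means unbounded: delta == 0 and the fixed coordinate is in range)
--         if not (0 <= start + delta < size):
--             return 0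
--         if delta > 0:
--             return (size - 1 - start) // delta
--         if delta < 0:
--             return start // (-delta)
--         return None
--
--     kr = axis_steps(row_start_position, delta_row, n)
--     kc = axis_steps(column_start_position, delta_column, m)
--     if kr is None and kc is None:
--         # both deltas zero on an in-range cell: the ray is that constant cell
--         return data[row_start_position + delta_row][column_start_position + delta_column]
--     k_max = kc if kr is None else (kr if kc is None else min(kr, kc))
--     ray = [
--         data[row_start_position + k * delta_row][column_start_position + k * delta_column]
--         for k in range(1, k_max + 1)
--     ]
--     return next((c for c in ray if c in ("#", "L")), ray[-1] if ray else "")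
-- ===== Notes on version B (the rewrite author's own statement) =====
-- stated objective: alternative
-- what changed: A's interleaved scan-and-early-return while-loop is replaced by computing the ray's in-bounds length in closed form (one floor division per axis), materialising the whole line of sight as a list, and answering with one query pass (first seat, else last element, else '').
-- outside the precondition, e.g. on get_line_of_sight(0, 0, 1, 0, ['..', '#.', '']): A returns '#', B raises IndexError
import Mathlib
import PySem

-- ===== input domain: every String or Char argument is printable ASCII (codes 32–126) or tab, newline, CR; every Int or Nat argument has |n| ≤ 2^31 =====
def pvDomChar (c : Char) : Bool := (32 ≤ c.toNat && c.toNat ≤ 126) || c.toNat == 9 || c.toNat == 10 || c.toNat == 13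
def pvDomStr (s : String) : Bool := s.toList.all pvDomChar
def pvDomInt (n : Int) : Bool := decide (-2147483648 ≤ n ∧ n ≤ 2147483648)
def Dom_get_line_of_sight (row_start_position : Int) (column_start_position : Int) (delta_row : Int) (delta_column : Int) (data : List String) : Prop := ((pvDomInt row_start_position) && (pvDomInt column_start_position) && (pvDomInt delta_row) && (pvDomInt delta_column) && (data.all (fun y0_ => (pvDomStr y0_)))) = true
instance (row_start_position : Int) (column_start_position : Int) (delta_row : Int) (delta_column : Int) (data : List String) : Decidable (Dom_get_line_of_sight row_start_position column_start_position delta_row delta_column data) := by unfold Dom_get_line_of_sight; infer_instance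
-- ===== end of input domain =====

-- B replaces A's interleaved scan-and-return while-loop by a closed-form ray length
-- (per-axis floor division) followed by materialising the ray and one query pass;
-- same cost, different structure (objective: alternative).

-- ===== PORT A =====
-- data[row][col] as a one-character string; the "" defaults are reached only where
-- Python raises IndexError, and Pre_ excludes those inputs.
def pvCell (data : List String) (r c : Int) : String :=
  match PySem.List.pyGet? data r with
  | some row =>
    match PySem.Str.pyGet? row c with
    | some ch => String.ofList [ch]
    | none => ""
  | none => ""

-- A's `while 1 == 1` loop, step for step; fuel only bounds the iteration count
-- (rows + cols + 2 covers every terminating run of A; A diverges exactly on the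
-- zero-delta floor cells excluded by Pre_).
def pvLoopA (rs cs dr dc : Int) (data : List String) : Nat → Int → String → String
  | 0, _, prev => prev
  | fuel+1, step, prev =>
    let row_position := rs + step * dr
    if row_position > (data.length : Int) - 1 ∨ row_position < 0 then prev
    else
      let column_position := cs + step * dc
      if column_position > (((data.headD "").length : Int)) - 1 ∨ column_position < 0 then prev
      else
        let next_position := pvCell data row_position column_position
        if next_position = "#" ∨ next_position = "L" then next_position
        else pvLoopA rs cs dr dc data fuel (step + 1) next_position

def get_line_of_sight (row_start_position : Int) (column_start_position : Int) (delta_row : Int) (delta_column : Int) (data : List String) : String :=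
  pvLoopA row_start_position column_start_position delta_row delta_column data
    (data.length + (data.headD "").length + 2) 1 ""

-- ===== PORT B =====
-- number of consecutive steps k = 1, 2, … with 0 ≤ start + k*delta < size
-- (none means unbounded: delta = 0 with the fixed coordinate in range).
def pvAxisSteps (start delta size : Int) : Option Int :=
  if ¬ (0 ≤ start + delta ∧ start + delta < size) then some 0
  else if 0 < delta then some (PySem.Int.floordiv (size - 1 - start) delta)
  else if delta < 0 then some (PySem.Int.floordiv start (-delta))
  else none

-- materialise the ray for k = 1 … kmax, then query it:
-- first seat in it, else its last element, else "".
def pvRayAnswer (rs cs dr dc : Int) (data : List String) (kmax : Int) : String :=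
  let ray := (PySem.List.pyRange 1 (kmax + 1) 1).map
      (fun k => pvCell data (rs + k * dr) (cs + k * dc))
  (ray.find? (fun c => c == "#" || c == "L")).getD ((ray.getLast?).getD "")

def get_line_of_sight_alt (row_start_position : Int) (column_start_position : Int) (delta_row : Int) (delta_column : Int) (data : List String) : String :=
  let n : Int := data.length
  let m : Int := (data.headD "").length      -- len(data[0]) if data else 0
  match pvAxisSteps row_start_position delta_row n, pvAxisSteps column_start_position delta_column m with
  | none, none =>
      -- both deltas zero on an in-range cell: the ray is that constant cell
      pvCell data (row_start_position + delta_row) (column_start_position + delta_column)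
  | none, some kc => pvRayAnswer row_start_position column_start_position delta_row delta_column data kc
  | some kr, none => pvRayAnswer row_start_position column_start_position delta_row delta_column data kr
  | some kr, some kc => pvRayAnswer row_start_position column_start_position delta_row delta_column data (min kr kc)

-- ===== PRECONDITION & SPEC =====
-- Pre_ excludes (a) inputs where a ray position passing A's bounds checks (which use
-- len(data[0])) falls beyond its own shorter row, where Python raises IndexError
-- (this also excludes some ragged grids on which A happens to return, e.g. when a seat
-- stops the scan before the short row), and (b) zero-delta rays fixed on an in-range
-- non-seat cell, where A loops forever.
def Pre_get_line_of_sight (row_start_position : Int) (column_start_position : Int) (delta_row : Int) (delta_column : Int) (data : List String) : Prop :=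
  (∀ k ∈ List.range (data.length + (data.headD "").length),
      0 ≤ row_start_position + ((k : Int) + 1) * delta_row →
      row_start_position + ((k : Int) + 1) * delta_row < (data.length : Int) →
      0 ≤ column_start_position + ((k : Int) + 1) * delta_column →
      column_start_position + ((k : Int) + 1) * delta_column < ((data.headD "").length : Int) →
      column_start_position + ((k : Int) + 1) * delta_column
        < (((data.getD (row_start_position + ((k : Int) + 1) * delta_row).toNat "").length : Int)))
  ∧ ¬ (delta_row = 0 ∧ delta_column = 0 ∧
       0 ≤ row_start_position ∧ row_start_position < (data.length : Int) ∧
       0 ≤ column_start_position ∧ column_start_position < ((data.headD "").length : Int) ∧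
       ((data.getD row_start_position.toNat "").toList.getD column_start_position.toNat ' ') ≠ '#' ∧
       ((data.getD row_start_position.toNat "").toList.getD column_start_position.toNat ' ') ≠ 'L')

instance (row_start_position : Int) (column_start_position : Int) (delta_row : Int) (delta_column : Int) (data : List String) : Decidable (Pre_get_line_of_sight row_start_position column_start_position delta_row delta_column data) := by unfold Pre_get_line_of_sight; infer_instance

def pvWitness_get_line_of_sight : Int × Int × Int × Int × List String := (0, 0, 1, 1, ["..", ".#"])

def Spec_get_line_of_sight (row_start_position : Int) (column_start_position : Int) (delta_row : Int) (delta_column : Int) (data : List String) (out : String) : Prop := out = get_line_of_sight_alt row_start_position column_start_position delta_row delta_column data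
instance (row_start_position : Int) (column_start_position : Int) (delta_row : Int) (delta_column : Int) (data : List String) (out : String) : Decidable (Spec_get_line_of_sight row_start_position column_start_position delta_row delta_column data out) := by unfold Spec_get_line_of_sight; infer_instance

-- ===== CLAIM (what is proved, stated in full; the proofs are below) =====
def Claim_equal_get_line_of_sight : Prop := ∀ (row_start_position : Int) (column_start_position : Int) (delta_row : Int) (delta_column : Int) (data : List String), Dom_get_line_of_sight row_start_position column_start_position delta_row delta_column data → Pre_get_line_of_sight row_start_position column_start_position delta_row delta_column data → Spec_get_line_of_sight row_start_position column_start_position delta_row delta_column data (get_line_of_sight row_start_position column_start_position delta_row delta_column data)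

-- ===== LEMMAS AND PROOFS =====

-- proof-side generalisation of pvRayAnswer's final query, with an arbitrary fallback
def pvQuery (ray : List String) (prev : String) : String :=
  (ray.find? (fun c => c == "#" || c == "L")).getD ((ray.getLast?).getD prev)

theorem pvQuery_nil (prev : String) : pvQuery [] prev = prev := by
  simp [pvQuery]

theorem pvQuery_cons_seat (c : String) (rest : List String) (prev : String)
    (h : c = "#" ∨ c = "L") : pvQuery (c :: rest) prev = c := by
  rcases h with rfl | rfl <;> simp [pvQuery, List.find?]

theorem pvQuery_cons_not_seat (c : String) (rest : List String) (prev : String)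
    (h : ¬ (c = "#" ∨ c = "L")) : pvQuery (c :: rest) prev = pvQuery rest c := by
  have h1 : (c == "#") = false :=
    beq_eq_false_iff_ne.mpr (fun hh => h (Or.inl hh))
  have h2 : (c == "L") = false :=
    beq_eq_false_iff_ne.mpr (fun hh => h (Or.inr hh))
  cases rest with
  | nil => simp [pvQuery, List.find?, h1, h2]
  | cons d ds =>
    obtain ⟨x, hx⟩ : ∃ x, (d :: ds).getLast? = some x :=
      Option.isSome_iff_exists.mp (by simp)
    simp [pvQuery, List.find?, h1, h2, hx]

theorem pvAxisSteps_none {start delta size : Int}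
    (h : pvAxisSteps start delta size = none) :
    delta = 0 ∧ 0 ≤ start ∧ start < size := by
  unfold pvAxisSteps at h
  split_ifs at h with h1 h2 h3
  have hd : delta = 0 := by omega
  subst hd
  exact ⟨rfl, by omega, by omega⟩

theorem pvAxisSteps_some_nonneg {start delta size : Int} {K : Int}
    (h : pvAxisSteps start delta size = some K) : 0 ≤ K := by
  unfold pvAxisSteps at h
  split_ifs at h with h1 h2 h3
  · rcases Option.some.inj h with rfl
    exact (PySem.Int.le_floordiv_iff_mul_le h2).mpr (by nlinarith [h1.1, h1.2])
  · rcases Option.some.inj h with rfl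
    exact (PySem.Int.le_floordiv_iff_mul_le (by omega : (0:Int) < -delta)).mpr
      (by nlinarith [h1.1, h1.2])
  · rcases Option.some.inj h with rfl; omega

theorem pvAxisSteps_some_in {start delta size : Int} {K : Int}
    (h : pvAxisSteps start delta size = some K) :
    ∀ k : Int, 1 ≤ k → k ≤ K → 0 ≤ start + k * delta ∧ start + k * delta < size := by
  unfold pvAxisSteps at h
  split_ifs at h with h1 h2 h3
  · rcases Option.some.inj h with rfl
    intro k hk1 hk2
    have hKb : k * delta ≤ size - 1 - start :=
      (PySem.Int.le_floordiv_iff_mul_le (a := size - 1 - start) h2).mp hk2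
    constructor <;> nlinarith [h1.1, h1.2]
  · rcases Option.some.inj h with rfl
    intro k hk1 hk2
    have hd : (0 : Int) < -delta := by omega
    have hKb : k * (-delta) ≤ start :=
      (PySem.Int.le_floordiv_iff_mul_le (a := start) hd).mp hk2
    constructor <;> nlinarith [h1.1, h1.2]
  · rcases Option.some.inj h with rfl
    intro k hk1 hk2; omega

theorem pvAxisSteps_some_out {start delta size : Int} {K : Int}
    (h : pvAxisSteps start delta size = some K) :
    ¬ (0 ≤ start + (K + 1) * delta ∧ start + (K + 1) * delta < size) := by
  unfold pvAxisSteps at h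
  split_ifs at h with h1 h2 h3
  · rcases Option.some.inj h with rfl
    have := (PySem.Int.floordiv_lt_iff_lt_mul (a := size - 1 - start) h2).mp (lt_add_one _)
    intro hc; nlinarith [hc.1, hc.2]
  · rcases Option.some.inj h with rfl
    have hd : (0 : Int) < -delta := by omega
    have := (PySem.Int.floordiv_lt_iff_lt_mul (a := start) hd).mp (lt_add_one _)
    intro hc; nlinarith [hc.1, hc.2]
  · rcases Option.some.inj h with rfl; simpa using h1

theorem pvAxisSteps_some_delta {start delta size : Int} {K : Int}
    (h : pvAxisSteps start delta size = some K) : K = 0 ∨ delta ≠ 0 := by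
  unfold pvAxisSteps at h
  split_ifs at h with h1 h2 h3
  · exact Or.inr (by omega)
  · exact Or.inr (by omega)
  · rcases Option.some.inj h with rfl; exact Or.inl rfl

theorem pvAxisSteps_some_le {start delta size : Int} {K : Int} (hsz : 0 ≤ size)
    (h : pvAxisSteps start delta size = some K) : K ≤ size := by
  by_cases hK : K ≤ 0
  · omega
  · rcases pvAxisSteps_some_delta h with rfl | hd
    · omega
    · have hin1 := pvAxisSteps_some_in h 1 le_rfl (by omega)
      have hinK := pvAxisSteps_some_in h K (by omega) le_rfl
      rcases lt_or_gt_of_ne hd with hneg | hpos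
      · nlinarith [hin1.1, hinK.2, hin1.2, hinK.1]
      · nlinarith [hin1.1, hinK.2, hin1.2, hinK.1]

-- The main loop lemma: on a ray whose in-bounds steps include 1 … K and whose
-- step K+1 is out of bounds, A's loop from step s computes B's query of the
-- remaining ray segment.
theorem pvLoopA_eq_query (rs cs dr dc : Int) (data : List String) (K : Int)
    (HIn : ∀ k : Int, 1 ≤ k → k ≤ K →
      (0 ≤ rs + k * dr ∧ rs + k * dr < (data.length : Int)) ∧
      (0 ≤ cs + k * dc ∧ cs + k * dc < ((data.headD "").length : Int)))
    (HOut : ¬ ((0 ≤ rs + (K + 1) * dr ∧ rs + (K + 1) * dr < (data.length : Int)) ∧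
               (0 ≤ cs + (K + 1) * dc ∧ cs + (K + 1) * dc < ((data.headD "").length : Int)))) :
    ∀ (fuel : Nat) (s : Int) (prev : String), 1 ≤ s → s ≤ K + 1 → K + 1 - s < (fuel : Int) →
      pvLoopA rs cs dr dc data fuel s prev =
        pvQuery ((PySem.List.pyRange s (K + 1) 1).map
          (fun k => pvCell data (rs + k * dr) (cs + k * dc))) prev := by
  intro fuel
  induction fuel with
  | zero => intro s prev h1 h2 h3; simp at h3; omega
  | succ fuel ih =>
    intro s prev hs1 hs2 hfuel
    by_cases hsK : s = K + 1
    · subst hsK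
      have hray : PySem.List.pyRange (K + 1) (K + 1) 1 = [] := by
        simp
      rw [hray]
      simp only [List.map_nil, pvQuery_nil]
      simp only [pvLoopA]
      split_ifs with hrow hcol hseat
      · rfl
      · rfl
      all_goals (exfalso; exact HOut ⟨⟨by omega, by omega⟩, by omega, by omega⟩)
    · have hsK' : s ≤ K := by omega
      have hin := HIn s hs1 hsK'
      have hray : PySem.List.pyRange s (K + 1) 1
          = s :: PySem.List.pyRange (s + 1) (K + 1) 1 :=
        PySem.List.pyRange_one_cons (by omega)
      rw [hray, List.map_cons]
      simp only [pvLoopA]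
      split_ifs with hrow hcol hseat
      · exfalso; omega
      · exfalso; omega
      · rw [pvQuery_cons_seat _ _ _ hseat]
      · rw [pvQuery_cons_not_seat _ _ _ hseat]
        exact ih (s + 1) _ (by omega) (by omega) (by push_cast at hfuel ⊢; omega)

theorem pvRayAnswer_eq_query (rs cs dr dc : Int) (data : List String) (kmax : Int) :
    pvRayAnswer rs cs dr dc data kmax =
      pvQuery ((PySem.List.pyRange 1 (kmax + 1) 1).map
        (fun k => pvCell data (rs + k * dr) (cs + k * dc))) "" := rfl

-- A's full loop run equals B's materialise-then-query, for a combined step count K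
theorem pvLoopA_eq_rayAnswer (rs cs dr dc : Int) (data : List String) (K : Int)
    (hK0 : 0 ≤ K)
    (hKle : K ≤ (data.length : Int) + ((data.headD "").length : Int))
    (HIn : ∀ k : Int, 1 ≤ k → k ≤ K →
      (0 ≤ rs + k * dr ∧ rs + k * dr < (data.length : Int)) ∧
      (0 ≤ cs + k * dc ∧ cs + k * dc < ((data.headD "").length : Int)))
    (HOut : ¬ ((0 ≤ rs + (K + 1) * dr ∧ rs + (K + 1) * dr < (data.length : Int)) ∧
               (0 ≤ cs + (K + 1) * dc ∧ cs + (K + 1) * dc < ((data.headD "").length : Int)))) :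
    pvLoopA rs cs dr dc data (data.length + (data.headD "").length + 2) 1 "" =
      pvRayAnswer rs cs dr dc data K := by
  rw [pvRayAnswer_eq_query]
  exact pvLoopA_eq_query rs cs dr dc data K HIn HOut _ 1 "" le_rfl (by omega)
    (by push_cast; omega)

-- one unfolding of A's loop when the current cell is in bounds and is a seat
theorem pvLoopA_step_seat (rs cs dr dc : Int) (data : List String) (fuel : Nat)
    (s : Int) (prev : String)
    (hrow : ¬ (rs + s * dr > (data.length : Int) - 1 ∨ rs + s * dr < 0))
    (hcol : ¬ (cs + s * dc > ((data.headD "").length : Int) - 1 ∨ cs + s * dc < 0))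
    (hseat : pvCell data (rs + s * dr) (cs + s * dc) = "#" ∨
             pvCell data (rs + s * dr) (cs + s * dc) = "L") :
    pvLoopA rs cs dr dc data (fuel + 1) s prev
      = pvCell data (rs + s * dr) (cs + s * dc) := by
  simp only [pvLoopA]
  rw [if_neg hrow, if_neg hcol, if_pos hseat]

-- reduce pvCell at an index that is in range for its own row
theorem pvCell_eq (data : List String) (r c : Int)
    (hr0 : 0 ≤ r) (hrn : r < (data.length : Int)) (hc0 : 0 ≤ c)
    (hcm : c < (((data.getD r.toNat "").length : Int))) :
    pvCell data r c = String.ofList [(data.getD r.toNat "").toList.getD c.toNat ' '] := by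
  have hrn' : r.toNat < data.length := by omega
  have hrow : PySem.List.pyGet? data r = some (data.getD r.toNat "") := by
    rw [PySem.List.pyGet?_of_nonneg data hr0, List.getElem?_eq_getElem hrn']
    rw [List.getD_eq_getElem data "" hrn']
  have hcm' : c.toNat < (data.getD r.toNat "").toList.length := by
    rw [String.length_toList]; omega
  have hch : PySem.Str.pyGet? (data.getD r.toNat "") c
      = some ((data.getD r.toNat "").toList.getD c.toNat ' ') := by
    simp only [PySem.Str.pyGet?_eq, PySem.Chars.pyGet?_eq_listPyGet?]
    rw [PySem.List.pyGet?_of_nonneg _ hc0, List.getElem?_eq_getElem hcm']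
    rw [List.getD_eq_getElem _ ' ' hcm']
  unfold pvCell
  simp only [hrow, hch]

-- ===== VERDICT (by name: the statement is the Claim_ definition above) =====
theorem get_line_of_sight_spec : Claim_equal_get_line_of_sight := by
  intro rs cs dr dc data hdom hpre
  unfold Spec_get_line_of_sight
  obtain ⟨hpre1, hpre2⟩ := hpre
  have hn0 : (0 : Int) ≤ (data.length : Int) := Int.natCast_nonneg _
  have hm0 : (0 : Int) ≤ ((data.headD "").length : Int) := Int.natCast_nonneg _
  unfold get_line_of_sight get_line_of_sight_alt
  rcases hkr : pvAxisSteps rs dr (data.length : Int) with _ | kr <;>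
    rcases hkc : pvAxisSteps cs dc ((data.headD "").length : Int) with _ | kc <;>
    simp only [hkr, hkc]
  · -- none, none : both deltas zero on an in-range cell
    obtain ⟨hdr, hrs0, hrsn⟩ := pvAxisSteps_none hkr
    obtain ⟨hdc, hcs0, hcsm⟩ := pvAxisSteps_none hkc
    subst hdr; subst hdc
    have hmem : 0 ∈ List.range (data.length + (data.headD "").length) :=
      List.mem_range.mpr (by omega)
    have hcell := hpre1 0 hmem (by push_cast; omega) (by push_cast; omega)
      (by push_cast; omega) (by push_cast; omega)
    have hrw : rs + ((0 : Nat) + 1 : Int) * 0 = rs := by push_cast; ring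
    rw [hrw] at hcell
    have hcrw : cs + ((0 : Nat) + 1 : Int) * 0 = cs := by push_cast; ring
    rw [hcrw] at hcell
    have hc1 : pvCell data rs cs
        = String.ofList [(data.getD rs.toNat "").toList.getD cs.toNat ' '] :=
      pvCell_eq data rs cs hrs0 hrsn hcs0 hcell
    have hseat : (data.getD rs.toNat "").toList.getD cs.toNat ' ' = '#' ∨
        (data.getD rs.toNat "").toList.getD cs.toNat ' ' = 'L' := by
      by_contra hcon
      exact hpre2 ⟨rfl, rfl, hrs0, hrsn, hcs0, hcsm,
        fun hh => hcon (Or.inl hh), fun hh => hcon (Or.inr hh)⟩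
    have hseat' : pvCell data rs cs = "#" ∨ pvCell data rs cs = "L" := by
      rw [hc1]
      rcases hseat with hh | hh <;> rw [hh]
      · exact Or.inl rfl
      · exact Or.inr rfl
    have hf : data.length + (data.headD "").length + 2
        = (data.length + (data.headD "").length + 1) + 1 := rfl
    rw [hf, pvLoopA_step_seat]
    · have h1 : rs + 1 * 0 = rs + 0 := by ring
      have h2 : cs + 1 * 0 = cs + 0 := by ring
      rw [h1, h2]
    · intro hcon; omega
    · intro hcon; omega
    · have h1 : rs + 1 * 0 = rs := by ring
      have h2 : cs + 1 * 0 = cs := by ring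
      rw [h1, h2]
      exact hseat'
  · -- none, some kc : row fixed in range, column axis bounds the ray
    obtain ⟨hdr, hrs0, hrsn⟩ := pvAxisSteps_none hkr
    subst hdr
    refine pvLoopA_eq_rayAnswer rs cs 0 dc data kc (pvAxisSteps_some_nonneg hkc)
      (by have := pvAxisSteps_some_le hm0 hkc; omega) ?_ ?_
    · intro k hk1 hk2
      have h0 : rs + k * 0 = rs := by ring
      rw [h0]
      exact ⟨⟨hrs0, hrsn⟩, pvAxisSteps_some_in hkc k hk1 hk2⟩
    · intro hc
      exact pvAxisSteps_some_out hkc hc.2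
  · -- some kr, none : column fixed in range, row axis bounds the ray
    obtain ⟨hdc, hcs0, hcsm⟩ := pvAxisSteps_none hkc
    subst hdc
    refine pvLoopA_eq_rayAnswer rs cs dr 0 data kr (pvAxisSteps_some_nonneg hkr)
      (by have := pvAxisSteps_some_le hn0 hkr; omega) ?_ ?_
    · intro k hk1 hk2
      have h0 : cs + k * 0 = cs := by ring
      rw [h0]
      exact ⟨pvAxisSteps_some_in hkr k hk1 hk2, hcs0, hcsm⟩
    · intro hc
      exact pvAxisSteps_some_out hkr hc.1
  · -- some, some : both axes bound the ray
    refine pvLoopA_eq_rayAnswer rs cs dr dc data (min kr kc)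
      (le_min (pvAxisSteps_some_nonneg hkr) (pvAxisSteps_some_nonneg hkc))
      (by have := pvAxisSteps_some_le hn0 hkr
          have := min_le_left kr kc; omega) ?_ ?_
    · intro k hk1 hk2
      exact ⟨pvAxisSteps_some_in hkr k hk1 (le_trans hk2 (min_le_left _ _)),
             pvAxisSteps_some_in hkc k hk1 (le_trans hk2 (min_le_right _ _))⟩
    · intro hc
      rcases le_total kr kc with hmin | hmin
      · rw [min_eq_left hmin] at hc
        exact pvAxisSteps_some_out hkr hc.1
      · rw [min_eq_right hmin] at hc
        exact pvAxisSteps_some_out hkc hc.2
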